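-- pv_equiv track=rewrite | github.com/orez-/python-sundry | hr_xword/main.py | reconstruct_board
-- ===== SOURCE A (Python) =====
-- import collections
--
-- BOARD_SIZE = 10
--
-- def reconstruct_board(assigned_words):
--     letter_lookups = {}
--     for (direction, a, start, _), word in assigned_words.items():
--         for b, letter in enumerate(word, start):
--             coords = (a, b) if direction != 'across' else (b, a)
--             letter_lookups[coords] = letter
--
--     buffer = collections.deque()
--     for y in range(BOARD_SIZE):
--         for x in range(BOARD_SIZE):
--             buffer.append(letter_lookups.get((x, y), '+'))
--         buffer.append('\n')
--     return ''.join(buffer)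
-- ===== SOURCE B (Python) =====
-- BOARD_SIZE = 10
--
-- def _cover(entry, x, y):
--     (direction, a, start, _), word = entry
--     if direction != 'across':
--         if a == x and start <= y < start + len(word):
--             return word[y - start]
--     else:
--         if a == y and start <= x < start + len(word):
--             return word[x - start]
--     return None
--
-- def _cell(rev_items, x, y):
--     for entry in rev_items:
--         c = _cover(entry, x, y)
--         if c is not None:
--             return c
--     return '+'
--
-- def reconstruct_board(assigned_words):
--     rev_items = list(assigned_words.items())[::-1]
--     return ''.join(
--         ''.join(_cell(rev_items, x, y) for x in range(BOARD_SIZE)) + '\n'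
--         for y in range(BOARD_SIZE))
-- ===== Notes on version B (the rewrite author's own statement) =====
-- stated objective: alternative
-- what changed: B never builds any board or coordinate store: it computes each of the 100 cells on demand by scanning the entries in reverse for the first word covering that cell (index arithmetic gives the letter), instead of A's scatter pass that writes every letter into a coordinate dict and then reads the dict per cell.
import Mathlib
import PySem

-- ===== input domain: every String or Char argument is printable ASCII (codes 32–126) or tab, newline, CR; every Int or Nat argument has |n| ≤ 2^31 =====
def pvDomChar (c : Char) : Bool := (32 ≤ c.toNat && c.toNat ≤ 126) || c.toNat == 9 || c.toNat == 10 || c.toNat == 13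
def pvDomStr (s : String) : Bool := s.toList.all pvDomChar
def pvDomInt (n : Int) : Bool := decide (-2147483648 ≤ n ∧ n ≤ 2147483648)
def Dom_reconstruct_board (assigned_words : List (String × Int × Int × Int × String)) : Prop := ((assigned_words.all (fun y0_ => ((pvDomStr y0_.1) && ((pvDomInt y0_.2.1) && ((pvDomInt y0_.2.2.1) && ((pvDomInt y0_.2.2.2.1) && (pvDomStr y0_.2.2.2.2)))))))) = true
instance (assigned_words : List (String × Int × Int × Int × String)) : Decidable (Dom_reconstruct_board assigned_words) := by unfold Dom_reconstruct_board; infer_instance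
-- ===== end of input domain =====

-- B computes each of the 100 cells on demand by a reverse first-match search over the
-- entries (index arithmetic yields the letter), instead of A's scatter pass that writes
-- every letter into a coordinate dict and then reads the dict per cell; equal return value is proved.
-- The Python parameter is a dict keyed by the 4-tuple; both ports decode the association
-- list into that dict first (duplicate keys: last value wins, first position kept).
def pvItems (assigned_words : List (String × Int × Int × Int × String)) : List ((String × Int × Int × Int) × String) :=
  (PySem.Dict.ofList (assigned_words.map (fun t => ((t.1, t.2.1, t.2.2.1, t.2.2.2.1), t.2.2.2.2)))).items

-- ===== PORT A =====
-- one item of A's first loop: insert every letter of the word into letter_lookups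
def pvStepA (d : PySem.Dict (Int × Int) Char) (p : (String × Int × Int × Int) × String) : PySem.Dict (Int × Int) Char :=
  (PySem.List.enumerate p.2.toList p.1.2.2.1).foldl (fun d q =>
    d.insert (if p.1.1 ≠ "across" then (p.1.2.1, q.1) else (q.1, p.1.2.1)) q.2) d

def reconstruct_board (assigned_words : List (String × Int × Int × Int × String)) : String :=
  let letter_lookups := (pvItems assigned_words).foldl pvStepA PySem.Dict.empty
  let buffer : List Char :=
    (PySem.List.pyRange 0 10 1).foldl (fun buf y =>
      ((PySem.List.pyRange 0 10 1).foldl (fun buf x =>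
        buf ++ [letter_lookups.getD (x, y) '+']) buf) ++ ['\n']) []
  String.ofList buffer

-- ===== PORT B =====
-- _cover: the letter the given entry puts at (x, y), if any
def pvCover (p : (String × Int × Int × Int) × String) (x y : Int) : Option Char :=
  if p.1.1 ≠ "across" then
    if p.1.2.1 = x ∧ p.1.2.2.1 ≤ y ∧ y < p.1.2.2.1 + p.2.toList.length then
      some (p.2.toList.getD (y - p.1.2.2.1).toNat '+')
    else none
  else
    if p.1.2.1 = y ∧ p.1.2.2.1 ≤ x ∧ x < p.1.2.2.1 + p.2.toList.length then
      some (p.2.toList.getD (x - p.1.2.2.1).toNat '+')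
    else none

-- _cell: first entry of the reversed item list covering (x, y), else '+'
def pvCell : List ((String × Int × Int × Int) × String) → Int → Int → Char
  | [], _, _ => '+'
  | p :: rest, x, y =>
    match pvCover p x y with
    | some c => c
    | none => pvCell rest x y

def reconstruct_board_alt (assigned_words : List (String × Int × Int × Int × String)) : String :=
  let rev_items := (pvItems assigned_words).reverse
  String.ofList (((PySem.List.pyRange 0 10 1).map (fun y =>
    ((PySem.List.pyRange 0 10 1).map (fun x => pvCell rev_items x y)) ++ ['\n'])).flatten)

-- ===== PRECONDITION & SPEC =====
def Spec_reconstruct_board (assigned_words : List (String × Int × Int × Int × String)) (out : String) : Prop := out = reconstruct_board_alt assigned_words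
instance (assigned_words : List (String × Int × Int × Int × String)) (out : String) : Decidable (Spec_reconstruct_board assigned_words out) := by unfold Spec_reconstruct_board; infer_instance

-- ===== CLAIM (what is proved, stated in full; the proofs are below) =====
def Claim_equal_reconstruct_board : Prop := ∀ (assigned_words : List (String × Int × Int × Int × String)), Dom_reconstruct_board assigned_words → Spec_reconstruct_board assigned_words (reconstruct_board assigned_words)

-- ===== LEMMAS AND PROOFS =====

-- a fold of inserts, read at one key, is a reverse first-match search over the inserted pairs
theorem pv_foldl_insert_getD (k : Int × Char → Int × Int) (K : Int × Int) :
    ∀ (E : List (Int × Char)) (d : PySem.Dict (Int × Int) Char) (c : Char),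
      (E.foldl (fun d q => d.insert (k q) q.2) d).getD K c
      = (E.reverse.findSome? (fun q => if K = k q then some q.2 else none)).getD (d.getD K c) := by
  intro E
  induction E with
  | nil => intro d c; rfl
  | cons q E ih =>
    intro d c
    simp only [List.foldl_cons, List.reverse_cons, List.findSome?_append]
    rw [ih]
    cases E.reverse.findSome? (fun q => if K = k q then some q.2 else none) with
    | some a => simp
    | none =>
      simp only [Option.none_or, List.findSome?_cons, List.findSome?_nil,
        PySem.Dict.getD_insert]
      by_cases h : K = k q
      · simp [h]
      · simp [h]

-- the reverse search over one enumerated word, filtered on the index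
theorem pv_enum_find : ∀ (w : List Char) (start t : Int),
    ((PySem.List.enumerate w start).reverse.findSome? (fun q => if q.1 = t then some q.2 else none))
    = if start ≤ t ∧ t < start + w.length then some (w.getD (t - start).toNat '+') else none := by
  intro w
  induction w with
  | nil => intro start t; simp [PySem.List.enumerate_nil]
  | cons c w ih =>
    intro start t
    rw [PySem.List.enumerate_cons]
    simp only [List.reverse_cons, List.findSome?_append, ih]
    by_cases h1 : start + 1 ≤ t ∧ t < start + 1 + w.length
    · rw [if_pos h1]
      have ht : (t - start).toNat = (t - (start + 1)).toNat + 1 := by omega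
      rw [if_pos (by simp only [List.length_cons]; push_cast; omega)]
      simp [ht]
    · rw [if_neg h1]
      simp only [Option.none_or, List.findSome?_cons, List.findSome?_nil]
      by_cases h2 : start = t
      · rw [if_pos h2, if_pos (by simp only [List.length_cons]; push_cast; omega)]
        have h0 : (t - start).toNat = 0 := by omega
        simp [h0]
      · rw [if_neg h2, if_neg (by simp only [List.length_cons]; push_cast; omega)]

-- the reverse search over one entry's enumerated word is exactly that entry's cover
theorem pv_cover_search (p : (String × Int × Int × Int) × String) (x y : Int) :
    ((PySem.List.enumerate p.2.toList p.1.2.2.1).reverse.findSome?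
      (fun q => if ((x, y) : Int × Int) = (if p.1.1 ≠ "across" then (p.1.2.1, q.1) else (q.1, p.1.2.1)) then some q.2 else none))
    = pvCover p x y := by
  by_cases hd : p.1.1 = "across"
  · have hf : (fun (q : Int × Char) => if ((x, y) : Int × Int) = (if p.1.1 ≠ "across" then (p.1.2.1, q.1) else (q.1, p.1.2.1)) then some q.2 else none)
        = (fun q => if p.1.2.1 = y then (if q.1 = x then some q.2 else none) else none) := by
      funext q
      by_cases hy : p.1.2.1 = y <;> by_cases hx : q.1 = x <;>
        simp [hd, hy, hx, Prod.ext_iff, eq_comm] <;> omega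
    rw [hf]
    by_cases hy : p.1.2.1 = y
    · simp only [hy, if_true]
      rw [pv_enum_find]
      simp [pvCover, hd, hy]
    · simp only [hy, if_false]
      simp [pvCover, hd, hy, List.findSome?_eq_none_iff]
  · have hf : (fun (q : Int × Char) => if ((x, y) : Int × Int) = (if p.1.1 ≠ "across" then (p.1.2.1, q.1) else (q.1, p.1.2.1)) then some q.2 else none)
        = (fun q => if p.1.2.1 = x then (if q.1 = y then some q.2 else none) else none) := by
      funext q
      by_cases hx : p.1.2.1 = x <;> by_cases hy : q.1 = y <;>
        simp [hd, hx, hy, Prod.ext_iff, eq_comm] <;> omega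
    rw [hf]
    by_cases hx : p.1.2.1 = x
    · simp only [hx, if_true]
      rw [pv_enum_find]
      simp [pvCover, hd, hx]
    · simp only [hx, if_false]
      simp [pvCover, hd, hx, List.findSome?_eq_none_iff]

-- one A-step read at one cell is that entry's cover, falling back to the old dict
theorem pv_stepA_getD (d : PySem.Dict (Int × Int) Char) (p : (String × Int × Int × Int) × String) (x y : Int) (c : Char) :
    (pvStepA d p).getD (x, y) c = (pvCover p x y).getD (d.getD (x, y) c) := by
  unfold pvStepA
  rw [pv_foldl_insert_getD (fun q => if p.1.1 ≠ "across" then (p.1.2.1, q.1) else (q.1, p.1.2.1)) (x, y),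
    pv_cover_search]

-- the whole scatter fold, read at one cell, is the reverse first-match over the items
theorem pv_fold_getD (x y : Int) : ∀ (L : List ((String × Int × Int × Int) × String)) (d : PySem.Dict (Int × Int) Char) (c : Char),
    (L.foldl pvStepA d).getD (x, y) c
    = (L.reverse.findSome? (fun p => pvCover p x y)).getD (d.getD (x, y) c) := by
  intro L
  induction L with
  | nil => intro d c; rfl
  | cons p L ih =>
    intro d c
    simp only [List.foldl_cons, List.reverse_cons, List.findSome?_append]
    rw [ih, pv_stepA_getD]
    cases L.reverse.findSome? (fun p => pvCover p x y) with
    | some a => simp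
    | none =>
      simp only [Option.none_or, List.findSome?_cons, List.findSome?_nil]
      cases pvCover p x y <;> simp

-- B's cell search is the same first-match, with '+' as fallback
theorem pv_cell_eq : ∀ (M : List ((String × Int × Int × Int) × String)) (x y : Int),
    pvCell M x y = (M.findSome? (fun p => pvCover p x y)).getD '+' := by
  intro M
  induction M with
  | nil => intro x y; rfl
  | cons p M ih =>
    intro x y
    simp only [pvCell, List.findSome?_cons]
    cases pvCover p x y with
    | some a => simp
    | none => simp [ih]

theorem pv_cell_lookup (L : List ((String × Int × Int × Int) × String)) (x y : Int) :
    (L.foldl pvStepA PySem.Dict.empty).getD (x, y) '+' = pvCell L.reverse x y := by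
  rw [pv_fold_getD, pv_cell_eq]
  rfl

theorem pv_pyRange_ten : PySem.List.pyRange 0 10 1 = [0,1,2,3,4,5,6,7,8,9] := by decide

-- ===== VERDICT (by name: the statement is the Claim_ definition above) =====
theorem reconstruct_board_spec : Claim_equal_reconstruct_board := by
  intro aw _
  simp only [Spec_reconstruct_board, reconstruct_board, reconstruct_board_alt]
  simp only [pv_pyRange_ten, List.foldl_cons, List.foldl_nil, List.map_cons, List.map_nil,
    List.flatten_cons, List.flatten_nil, pv_cell_lookup, List.nil_append, List.append_nil,
    List.cons_append, List.append_assoc]
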